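-- pv_equiv track=rewrite | github.com/knuu/competitive-programming | codeforces/cdf308_2c.py | solve
-- ===== SOURCE A (Python) =====
-- def convert_base(num, base):
--     converted = []
--     while num:
--         num, r = divmod(num, base)
--         converted.append(r)
--     return converted
--
-- def solve(w, m):
--     m_w = convert_base(m, w)
--     m_w +=  [0] * (101-len(m_w))
--     for i in range(101):
--         if m_w[i] == 0 or m_w[i] == 1:
--             continue
--         elif m_w[i] == w or m_w[i] == w-1:
--             m_w[i+1] += 1
--         else:
--             return False
--     return True
-- ===== SOURCE B (Python) =====
-- def solve(w, m):
--     while m: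
--         r = m % w
--         if r == 0 or r == 1:
--             m //= w
--         elif r == w - 1:
--             m = m // w + 1
--         else:
--             return False
--     return True
-- ===== Notes on version B (the rewrite author's own statement) =====
-- stated objective: simpler
-- what changed: Drops convert_base and the 101-slot zero-padded digit array with its explicit carry cell (m_w[i+1] += 1): B is one streaming while-loop on m that inspects m % w and folds the balance carry into the higher digits arithmetically via m = m // w + 1.
import Mathlib
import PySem

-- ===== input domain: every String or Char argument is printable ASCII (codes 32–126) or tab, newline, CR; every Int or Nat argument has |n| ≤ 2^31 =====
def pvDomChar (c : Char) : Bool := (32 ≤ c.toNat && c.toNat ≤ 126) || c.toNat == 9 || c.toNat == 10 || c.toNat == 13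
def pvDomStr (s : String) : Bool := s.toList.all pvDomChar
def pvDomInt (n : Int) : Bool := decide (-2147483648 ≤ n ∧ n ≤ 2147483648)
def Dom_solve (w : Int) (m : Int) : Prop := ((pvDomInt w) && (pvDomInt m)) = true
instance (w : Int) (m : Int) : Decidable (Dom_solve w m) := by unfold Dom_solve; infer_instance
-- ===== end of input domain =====

-- B replaces convert_base + a 101-slot padded digit array (explicit carry cell) by a single
-- streaming while-loop on m, folding the balance carry into integer arithmetic (m // w + 1).


-- ===== PORT A =====
-- `while num:` of convert_base, with fuel making the recursion total.  Fuel 64 never runs out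
-- on the admitted inputs: for |num| ≤ 2^31 and |base| ≥ 2 the loop runs < 35 times (proved
-- below); where the Python loop never terminates or raises (base in {-1,0,1} with num ≠ 0,
-- base ≥ 2 with num < 0 — all outside Pre_solve) the fuel merely cuts the recursion off.
def convertBase : Nat → Int → Int → List Int
  | 0, _, _ => []
  | fuel + 1, num, base =>
    if num = 0 then []
    else PySem.Int.mod num base :: convertBase fuel (PySem.Int.floordiv num base) base

-- the `for i in range(101)` loop over the padded digit list, with the in-place `m_w[i+1] += 1`;
-- rem counts the remaining iterations (starts at 101)
def solveLoop (w : Int) : List Int → Nat → Nat → Bool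
  | _, _, 0 => true
  | l, i, rem + 1 =>
    let d := l.getD i 0
    if d = 0 ∨ d = 1 then solveLoop w l (i + 1) rem
    else if d = w ∨ d = w - 1 then solveLoop w (l.set (i + 1) (l.getD (i + 1) 0 + 1)) (i + 1) rem
    else false

def solve (w : Int) (m : Int) : Bool :=
  let mw := convertBase 64 m w ++ List.replicate (101 - (convertBase 64 m w).length) 0
  solveLoop w mw 0 101

-- ===== PORT B =====
-- Source B's `while m:` loop, with the same fuel-64 totality guard: on the admitted inputs the
-- loop runs < 36 times (proved below); where the Python loop never terminates or raises
-- (w in {-1,0,1} or w = 2 with m ≠ 0 on the divergent side — outside Pre_solve) fuel cuts off.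
def altLoop : Nat → Int → Int → Bool
  | 0, _, _ => false
  | fuel + 1, w, m =>
    if m = 0 then true
    else if PySem.Int.mod m w = 0 ∨ PySem.Int.mod m w = 1 then
      altLoop fuel w (PySem.Int.floordiv m w)
    else if PySem.Int.mod m w = w - 1 then altLoop fuel w (PySem.Int.floordiv m w + 1)
    else false

def solve_alt (w : Int) (m : Int) : Bool := altLoop 64 w m

-- ===== PRECONDITION & SPEC =====
-- Pre_solve is exactly where the Python A terminates without an exception: m = 0 always returns;
-- for w ≥ 2 it needs m ≥ 0 (divmod loops forever on negatives), and every base w ≤ -2 terminates.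
-- w in {-1,0,1} with m ≠ 0 raises ZeroDivisionError (w=0) or loops forever.
def Pre_solve (w : Int) (m : Int) : Prop := m = 0 ∨ (2 ≤ w ∧ 0 ≤ m) ∨ w ≤ -2
instance (w : Int) (m : Int) : Decidable (Pre_solve w m) := by unfold Pre_solve; infer_instance

def pvWitness_solve : Int × Int := (3, 7)

def Spec_solve (w : Int) (m : Int) (out : Bool) : Prop := out = solve_alt w m
instance (w : Int) (m : Int) (out : Bool) : Decidable (Spec_solve w m out) := by unfold Spec_solve; infer_instance

-- ===== CLAIM (what is proved, stated in full; the proofs are below) =====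
def Claim_equal_solve : Prop := ∀ (w : Int) (m : Int), Dom_solve w m → Pre_solve w m → Spec_solve w m (solve w m)

-- ===== LEMMAS AND PROOFS =====

-- step bounds for one floor-division step, in each sign regime
theorem pvStep_pos (w m : Int) (hw : 2 ≤ w) (hm : 0 ≤ m) :
    0 ≤ PySem.Int.floordiv m w ∧ 2 * PySem.Int.floordiv m w ≤ m := by
  have hid := PySem.Int.floordiv_mul_add_mod m w
  have h0 := PySem.Int.mod_nonneg m (b := w) (by omega)
  have h1 := PySem.Int.mod_lt m (b := w) (by omega)
  set q := PySem.Int.floordiv m w with hq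
  have hq0 : 0 ≤ q := by
    by_contra hneg
    have : q * w ≤ (-1) * w := mul_le_mul_of_nonneg_right (by omega : q ≤ -1) (by omega)
    omega
  constructor
  · exact hq0
  · have : 2 * q ≤ w * q := by nlinarith
    nlinarith

theorem pvStep_negbase_pos (w m : Int) (hw : w ≤ -2) (hm : 0 < m) :
    PySem.Int.floordiv m w ≤ -1 ∧ 2 * (PySem.Int.floordiv m w).natAbs ≤ m.natAbs + 1 := by
  have hid := PySem.Int.floordiv_mul_add_mod m w
  have hb := PySem.Int.mod_neg_bounds m (b := w) (by omega)
  set q := PySem.Int.floordiv m w with hq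
  have hqneg : q ≤ -1 := by
    by_contra hpos
    have : q * w ≤ 0 := mul_nonpos_of_nonneg_of_nonpos (by omega) (by omega)
    omega
  have key : 2 * (-q) ≤ m + 1 := by nlinarith
  exact ⟨hqneg, by omega⟩

theorem pvStep_negbase_neg (w m : Int) (hw : w ≤ -2) (hm : m < 0) :
    0 ≤ PySem.Int.floordiv m w ∧ 2 * (PySem.Int.floordiv m w).natAbs ≤ m.natAbs := by
  have hid := PySem.Int.floordiv_mul_add_mod m w
  have hb := PySem.Int.mod_neg_bounds m (b := w) (by omega)
  set q := PySem.Int.floordiv m w with hq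
  have hq0 : 0 ≤ q := by
    by_contra hneg
    have : (-1) * w ≤ q * w := mul_le_mul_of_nonpos_right (by omega : q ≤ -1) (by omega)
    omega
  have key : 2 * q ≤ -m := by nlinarith
  exact ⟨hq0, by omega⟩

-- exact floordiv/mod from the division identity and the remainder bracket
theorem pvFdivMod_eq_pos (w m q r : Int) (hw : 0 < w) (h : q * w + r = m)
    (h0 : 0 ≤ r) (h1 : r < w) :
    PySem.Int.floordiv m w = q ∧ PySem.Int.mod m w = r := by
  have hid := PySem.Int.floordiv_mul_add_mod m w
  have hm0 := PySem.Int.mod_nonneg m (b := w) hw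
  have hm1 := PySem.Int.mod_lt m (b := w) hw
  set Q := PySem.Int.floordiv m w with hQ
  set R := PySem.Int.mod m w with hR
  have hd : Q = q := by
    rcases lt_trichotomy Q q with hlt | heq | hgt
    · have h1' : (Q - q) * w ≤ (-1) * w := mul_le_mul_of_nonneg_right (by omega) (by omega)
      rw [sub_mul] at h1'; omega
    · exact heq
    · have h1' : (1 : Int) * w ≤ (Q - q) * w := mul_le_mul_of_nonneg_right (by omega) (by omega)
      rw [sub_mul] at h1'; omega
  subst hd; omega

theorem pvFdivMod_eq_neg (w m q r : Int) (hw : w < 0) (h : q * w + r = m)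
    (h0 : w < r) (h1 : r ≤ 0) :
    PySem.Int.floordiv m w = q ∧ PySem.Int.mod m w = r := by
  have hid := PySem.Int.floordiv_mul_add_mod m w
  have hb := PySem.Int.mod_neg_bounds m (b := w) hw
  set Q := PySem.Int.floordiv m w with hQ
  set R := PySem.Int.mod m w with hR
  have hd : Q = q := by
    rcases lt_trichotomy Q q with hlt | heq | hgt
    · have h1' : (-1) * w ≤ (Q - q) * w := mul_le_mul_of_nonpos_right (by omega) (by omega)
      rw [sub_mul] at h1'; omega
    · exact heq
    · have h1' : (Q - q) * w ≤ 1 * w := mul_le_mul_of_nonpos_right (by omega) (by omega)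
      rw [sub_mul] at h1'; omega
  subst hd; omega

-- `m_w[i+1] += 1` seen from the tail of the list
def addTop : List Int → List Int
  | [] => []
  | x :: xs => (x + 1) :: xs

theorem addTop_length (l : List Int) : (addTop l).length = l.length := by
  cases l <;> simp [addTop]

-- A's digit loop, rephrased on the suffix of the digit list that is still to be scanned
def procL (w : Int) : List Int → Bool
  | [] => true
  | d :: ds =>
    if d = 0 ∨ d = 1 then procL w ds
    else if d = w ∨ d = w - 1 then procL w (addTop ds)
    else false
termination_by l => l.length
decreasing_by all_goals simp [addTop_length]

-- A's digit loop on the raw digit string, with an explicit pending carry c ∈ {0,1}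
def procC (w : Int) : List Int → Int → Bool
  | [], _ => true
  | d :: ds, c =>
    if d + c = 0 ∨ d + c = 1 then procC w ds 0
    else if d + c = w ∨ d + c = w - 1 then procC w ds 1
    else false

def addC (c : Int) (l : List Int) : List Int := if c = 0 then l else addTop l

theorem pv_drop_set_cons (l : List Int) (j : Nat) (v : Int) (h : j < l.length) :
    (l.set j v).drop j = v :: l.drop (j + 1) := by
  induction l generalizing j with
  | nil => simp at h
  | cons x xs ih =>
    cases j with
    | zero => simp
    | succ j' => simpa using ih j' (by simpa using h)

theorem pv_getD_mem_or_default (l : List Int) (k : Nat) : l.getD k 0 ∈ l ∨ l.getD k 0 = 0 := by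
  by_cases h : k < l.length
  · left; rw [List.getD_eq_getElem l 0 h]; exact List.getElem_mem h
  · right; rw [List.getD_eq_default]; omega

theorem cb_zero (f : Nat) (w : Int) : convertBase f 0 w = [] := by
  cases f <;> simp [convertBase]

theorem cb_length_le_fuel (f : Nat) : ∀ (num base : Int), (convertBase f num base).length ≤ f := by
  induction f with
  | zero => intro num base; simp [convertBase]
  | succ f ih =>
    intro num base
    rw [convertBase]
    split
    · simp
    · simpa using Nat.succ_le_succ (ih _ _)

theorem solveLoop_eq_procL (w : Int) :
    ∀ (rem i : Nat) (l : List Int), l.length ≤ 101 → i + rem = 101 →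
      solveLoop w l i rem = procL w (l.drop i) := by
  intro rem
  induction rem with
  | zero =>
    intro i l hlen hni
    rw [solveLoop, List.drop_eq_nil_of_le (by omega)]
    simp [procL]
  | succ rem ih =>
    intro i l hlen hni
    rw [solveLoop]
    rcases hdrop : l.drop i with _ | ⟨d, rest⟩
    · have hlen' : l.length ≤ i := List.drop_eq_nil_iff.mp hdrop
      have hgd : l.getD i 0 = 0 := List.getD_eq_default _ _ hlen'
      rw [hgd, if_pos (Or.inl rfl), ih (i + 1) l hlen (by omega),
        List.drop_eq_nil_of_le (by omega : l.length ≤ i + 1)]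
    · have hgi : l[i]? = some d := by
        have h0 := List.getElem?_drop (xs := l) (i := i) (j := 0)
        rw [hdrop] at h0; simpa using h0.symm
      have hgd : l.getD i 0 = d := by simp [List.getD_eq_getElem?_getD, hgi]
      have hrest : l.drop (i + 1) = rest := by
        have h1 : (l.drop i).drop 1 = l.drop (i + 1) := List.drop_drop
        rw [hdrop] at h1; simpa using h1.symm
      simp only [hgd, procL]
      by_cases h1 : d = 0 ∨ d = 1
      · rw [if_pos h1, if_pos h1, ih (i + 1) l hlen (by omega), hrest]
      · rw [if_neg h1, if_neg h1]
        by_cases h2 : d = w ∨ d = w - 1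
        · rw [if_pos h2, if_pos h2,
            ih (i + 1) _ (by simpa using hlen) (by omega)]
          congr 1
          rcases hrest2 : rest with _ | ⟨x, rs⟩
          · subst hrest2
            have hl1 : l.length ≤ i + 1 := by
              rw [← List.drop_eq_nil_iff, hrest]
            rw [List.set_eq_of_length_le hl1, hrest]
            simp [addTop]
          · have hx : l[i + 1]? = some x := by
              have h0 := List.getElem?_drop (xs := l) (i := i + 1) (j := 0)
              rw [hrest, hrest2] at h0; simpa using h0.symm
            have hgd1 : l.getD (i + 1) 0 = x := by
              simp [List.getD_eq_getElem?_getD, hx]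
            have hlen1 : i + 1 < l.length :=
              (List.getElem?_eq_some_iff.mp hx).1
            rw [hgd1, pv_drop_set_cons l (i + 1) (x + 1) hlen1]
            have hrs : l.drop (i + 2) = rs := by
              have h1 : (l.drop (i + 1)).drop 1 = l.drop (i + 1 + 1) := List.drop_drop
              rw [hrest, hrest2] at h1; simpa using h1.symm
            simp [addTop, hrs]
        · rw [if_neg h2, if_neg h2]

theorem procL_replicate_zero (w : Int) (k : Nat) : procL w (List.replicate k 0) = true := by
  induction k with
  | zero => simp [procL]
  | succ k ih => rw [List.replicate_succ, procL]; simpa using ih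

theorem procL_pad (w : Int) :
    ∀ (ds : List Int) (k : Nat) (c : Int), 1 ≤ k → (c = 0 ∨ c = 1) →
      procL w (addC c (ds ++ List.replicate k 0)) = procC w ds c := by
  intro ds
  induction ds with
  | nil =>
    intro k c hk hc
    rcases hc with h | h <;> subst h
    · simpa [addC, procC] using procL_replicate_zero w k
    · rcases k with _ | k'
      · omega
      · rw [List.nil_append, List.replicate_succ]
        show procL w (addTop (0 :: List.replicate k' 0)) = procC w [] 1
        rw [show addTop ((0 : Int) :: List.replicate k' 0) = 1 :: List.replicate k' 0 by
          simp [addTop]]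
        rw [procL, if_pos (Or.inr rfl)]
        simpa [procC] using procL_replicate_zero w k'
  | cons d ds ih =>
    intro k c hk hc
    have haddc : addC c ((d :: ds) ++ List.replicate k 0)
        = (d + c) :: (ds ++ List.replicate k 0) := by
      rcases hc with h | h <;> subst h <;> simp [addC, addTop]
    rw [haddc, procL, procC]
    by_cases h1 : d + c = 0 ∨ d + c = 1
    · rw [if_pos h1, if_pos h1]
      have := ih k 0 hk (Or.inl rfl)
      simpa [addC] using this
    · rw [if_neg h1, if_neg h1]
      by_cases h2 : d + c = w ∨ d + c = w - 1
      · rw [if_pos h2, if_pos h2]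
        have := ih k 1 hk (Or.inr rfl)
        simpa [addC] using this
      · rw [if_neg h2, if_neg h2]

theorem alt_zero (w : Int) (f : Nat) (hf : 1 ≤ f) : altLoop f w 0 = true := by
  rcases f with _ | f
  · omega
  · rw [altLoop]; simp

-- B agrees with A's carry-processing of A's digit list, for w ≥ 2 and m ≥ 0:
-- 2|m| ≤ 2^n + 2 and fuel ≥ n + 3 keep both fuels from running out
theorem procC_eq_alt (w : Int) (hw : 2 ≤ w) :
    ∀ (n f1 f2 : Nat) (m c : Int), 2 * m.natAbs ≤ 2 ^ n + 2 → n + 3 ≤ f1 → n + 3 ≤ f2 →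
      0 ≤ m → (c = 0 ∨ c = 1) →
      procC w (convertBase f1 m w) c = altLoop f2 w (m + c) := by
  intro n
  induction n with
  | zero =>
    intro f1 f2 m c hm hf1 hf2 hm0 hc
    have : m = 0 ∨ m = 1 := by omega
    rcases this with h0 | h1
    · subst h0
      rw [cb_zero]
      rcases hc with h | h <;> subst h
      · simpa [procC] using (alt_zero w f2 (by omega)).symm
      · rcases f2 with _ | f2'
        · omega
        · have hfd := pvFdivMod_eq_pos w 1 0 1 (by omega) (by ring) (by omega) (by omega)
          rw [show (0 : Int) + 1 = 1 by ring, altLoop, if_neg (by omega), hfd.2,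
            if_pos (Or.inr rfl), hfd.1, alt_zero w f2' (by omega)]
          rfl
    · subst h1
      have hfd := pvFdivMod_eq_pos w 1 0 1 (by omega) (by ring) (by omega) (by omega)
      rcases f1 with _ | f1'
      · omega
      rcases f2 with _ | f2'
      · omega
      have hcb : convertBase (f1' + 1) 1 w = [1] := by
        rw [convertBase, if_neg (by omega), hfd.2, hfd.1, cb_zero]
      rw [hcb]
      rcases hc with h | h <;> subst h
      · rw [procC, if_pos (by norm_num)]
        rw [show (1 : Int) + 0 = 1 by ring, altLoop, if_neg (by omega), hfd.2,
          if_pos (Or.inr rfl), hfd.1, alt_zero w f2' (by omega)]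
        rfl
      · rw [procC, if_neg (by omega)]
        have h2 : (1 : Int) + 1 = 2 := by ring
        rw [h2]
        have hfd2q := pvFdivMod_eq_pos w (1 + 1) 1 0 (by omega)
        by_cases hw2 : w = 2
        · subst hw2
          have hfd2 := pvFdivMod_eq_pos 2 2 1 0 (by omega) (by ring) (by omega) (by omega)
          rw [if_pos (Or.inl rfl), altLoop, if_neg (by omega), hfd2.2, if_pos (Or.inl rfl),
            hfd2.1]
          rcases f2' with _ | f2''
          · omega
          · have hfd1 := pvFdivMod_eq_pos 2 1 0 1 (by omega) (by ring) (by omega) (by omega)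
            rw [altLoop, if_neg (by omega), hfd1.2, if_pos (Or.inr rfl), hfd1.1,
              alt_zero 2 f2'' (by omega)]
            simp [procC]
        · by_cases hw3 : w = 3
          · subst hw3
            have hfd2 := pvFdivMod_eq_pos 3 2 0 2 (by omega) (by ring) (by omega) (by omega)
            rw [if_pos (Or.inr (by omega)), altLoop, if_neg (by omega), hfd2.2,
              if_neg (by omega), if_pos (by omega), hfd2.1]
            rw [show (0 : Int) + 1 = 1 by ring]
            rcases f2' with _ | f2''
            · omega
            · have hfd1 := pvFdivMod_eq_pos 3 1 0 1 (by omega) (by ring) (by omega) (by omega)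
              rw [altLoop, if_neg (by omega), hfd1.2, if_pos (Or.inr rfl), hfd1.1,
                alt_zero 3 f2'' (by omega)]
              simp [procC]
          · have hfd2 := pvFdivMod_eq_pos w 2 0 2 (by omega) (by ring) (by omega) (by omega)
            rw [if_neg (by omega), altLoop, if_neg (by omega), hfd2.2,
              if_neg (by omega), if_neg (by omega)]
  | succ n ih =>
    intro f1 f2 m c hm hf1 hf2 hm0 hc
    by_cases h0 : m = 0
    · subst h0
      rw [cb_zero]
      rcases hc with h | h <;> subst h
      · simpa [procC] using (alt_zero w f2 (by omega)).symm
      · rcases f2 with _ | f2'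
        · omega
        · have hfd := pvFdivMod_eq_pos w 1 0 1 (by omega) (by ring) (by omega) (by omega)
          rw [show (0 : Int) + 1 = 1 by ring, altLoop, if_neg (by omega), hfd.2,
            if_pos (Or.inr rfl), hfd.1, alt_zero w f2' (by omega)]
          rfl
    · have hmp : 0 < m := by omega
      have hc01 : 0 ≤ c ∧ c ≤ 1 := by rcases hc with h | h <;> omega
      obtain ⟨hq0, hq2⟩ := pvStep_pos w m hw hm0
      have hqa : 2 * (PySem.Int.floordiv m w).natAbs ≤ m.natAbs := by omega
      have hid := PySem.Int.floordiv_mul_add_mod m w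
      have hr0 := PySem.Int.mod_nonneg m (b := w) (by omega)
      have hr1 := PySem.Int.mod_lt m (b := w) (by omega)
      set q := PySem.Int.floordiv m w with hqdef
      set r := PySem.Int.mod m w with hrdef
      have hpow : (2 : Nat) ^ (n + 1) = 2 * 2 ^ n := by rw [pow_succ]; ring
      have hqn : 2 * q.natAbs ≤ 2 ^ n + 2 := by omega
      rcases f1 with _ | f1'
      · omega
      rcases f2 with _ | f2'
      · omega
      have hcb : convertBase (f1' + 1) m w = r :: convertBase f1' q w := by
        rw [convertBase, if_neg h0]
      rw [hcb, procC, altLoop, if_neg (show ¬(m + c = 0) by omega)]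
      by_cases hew : r + c = w
      · have hmul : (q + 1) * w = q * w + w := by ring
        have hq' := pvFdivMod_eq_pos w (m + c) (q + 1) 0 (by omega) (by omega) (by omega)
          (by omega)
        rw [if_neg (show ¬(r + c = 0 ∨ r + c = 1) by omega), if_pos (Or.inl hew), hq'.2,
          if_pos (show (0 : Int) = 0 ∨ (0 : Int) = 1 from Or.inl rfl), hq'.1]
        exact ih f1' f2' q 1 hqn (by omega) (by omega) hq0 (Or.inr rfl)
      · have hq' := pvFdivMod_eq_pos w (m + c) q (r + c) (by omega) (by omega) (by omega)
          (by omega)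
        rw [hq'.2, hq'.1]
        by_cases h1 : r + c = 0 ∨ r + c = 1
        · rw [if_pos h1, if_pos h1]
          have := ih f1' f2' q 0 hqn (by omega) (by omega) hq0 (Or.inl rfl)
          rwa [add_zero] at this
        · rw [if_neg h1, if_neg h1]
          by_cases h2 : r + c = w - 1
          · rw [if_pos (Or.inr h2), if_pos h2]
            exact ih f1' f2' q 1 hqn (by omega) (by omega) hq0 (Or.inr rfl)
          · rw [if_neg (by omega), if_neg h2]

-- every digit produced in a negative base w ≤ -2 lies in (w, 0]
theorem cb_mem_bounds (f : Nat) :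
    ∀ (num base : Int), base ≤ -2 → ∀ x ∈ convertBase f num base, base < x ∧ x ≤ 0 := by
  induction f with
  | zero => intro num base hb x hx; simp [convertBase] at hx
  | succ f ih =>
    intro num base hb x hx
    rw [convertBase] at hx
    split at hx
    · simp at hx
    · rcases List.mem_cons.mp hx with hx1 | hx2
      · subst hx1; exact PySem.Int.mod_neg_bounds num (by omega)
      · exact ih _ _ hb x hx2

-- with enough fuel, a nonzero m in base w ≤ -2 leaves a nonzero digit in the list
theorem cb_exists_nonzero :
    ∀ (n f : Nat) (num base : Int), base ≤ -2 →
      2 * num.natAbs + (if 0 < num then 1 else 0) ≤ 2 ^ n + 2 → n + 2 ≤ f → num ≠ 0 →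
      ∃ j : Nat, j < (convertBase f num base).length ∧ (convertBase f num base).getD j 0 ≠ 0 := by
  intro n
  induction n with
  | zero =>
    intro f num base hb h hf h0
    have hn1 : num = 1 ∨ num = -1 := by split_ifs at h <;> omega
    rcases f with _ | f'
    · omega
    rw [convertBase, if_neg h0]
    refine ⟨0, by simp, ?_⟩
    rcases hn1 with h1 | h1 <;> subst h1
    · have hfd := pvFdivMod_eq_neg base 1 (-1) (base + 1) (by omega) (by ring) (by omega)
        (by omega)
      simpa [hfd.2] using (by omega : base + 1 ≠ 0)
    · have hfd := pvFdivMod_eq_neg base (-1) 0 (-1) (by omega) (by ring) (by omega) (by omega)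
      simp [hfd.2]
  | succ n ih =>
    intro f num base hb h hf h0
    have hid := PySem.Int.floordiv_mul_add_mod num base
    rcases f with _ | f'
    · omega
    rw [convertBase, if_neg h0]
    by_cases hr : PySem.Int.mod num base = 0
    · have hq0 : PySem.Int.floordiv num base ≠ 0 := by
        intro hq; rw [hq, hr] at hid; simp at hid; omega
      have hpow : (2 : Nat) ^ (n + 1) = 2 * 2 ^ n := by rw [pow_succ]; ring
      have hmeas : 2 * (PySem.Int.floordiv num base).natAbs
          + (if 0 < PySem.Int.floordiv num base then 1 else 0) ≤ 2 ^ n + 2 := by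
        rcases (by omega : 0 < num ∨ num < 0) with hmp | hmn
        · have hs := pvStep_negbase_pos base num hb hmp
          split_ifs with hi <;> split_ifs at h <;> omega
        · have hs := pvStep_negbase_neg base num hb hmn
          split_ifs with hi <;> split_ifs at h <;> omega
      obtain ⟨j, hj1, hj2⟩ := ih f' (PySem.Int.floordiv num base) base hb hmeas (by omega) hq0
      exact ⟨j + 1, by simpa using Nat.succ_lt_succ hj1, by simpa using hj2⟩
    · exact ⟨0, by simp, by simpa using hr⟩

-- B returns False for every w ≤ -2 and m ≠ 0 (digits are ≤ 0 and never hit 1, w or w-1)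
theorem alt_negbase_false :
    ∀ (n f : Nat) (w m : Int), w ≤ -2 →
      2 * m.natAbs + (if 0 < m then 1 else 0) ≤ 2 ^ n + 2 → n + 2 ≤ f → m ≠ 0 →
      altLoop f w m = false := by
  intro n
  induction n with
  | zero =>
    intro f w m hw h hf hm
    have hn1 : m = 1 ∨ m = -1 := by split_ifs at h <;> omega
    rcases f with _ | f'
    · omega
    rw [altLoop, if_neg hm]
    have hb := PySem.Int.mod_neg_bounds m (b := w) (by omega)
    rcases hn1 with h1 | h1 <;> subst h1
    · have hfd := pvFdivMod_eq_neg w 1 (-1) (w + 1) (by omega) (by ring) (by omega) (by omega)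
      rw [hfd.2, if_neg (by omega), if_neg (by omega)]
    · have hfd := pvFdivMod_eq_neg w (-1) 0 (-1) (by omega) (by ring) (by omega) (by omega)
      rw [hfd.2, if_neg (by omega), if_neg (by omega)]
  | succ n ih =>
    intro f w m hw h hf hm
    have hid := PySem.Int.floordiv_mul_add_mod m w
    have hb := PySem.Int.mod_neg_bounds m (b := w) (by omega)
    rcases f with _ | f'
    · omega
    rw [altLoop, if_neg hm]
    by_cases hr : PySem.Int.mod m w = 0
    · rw [if_pos (Or.inl hr)]
      have hq0 : PySem.Int.floordiv m w ≠ 0 := by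
        intro hq; rw [hq, hr] at hid; simp at hid; omega
      have hpow : (2 : Nat) ^ (n + 1) = 2 * 2 ^ n := by rw [pow_succ]; ring
      have hmeas : 2 * (PySem.Int.floordiv m w).natAbs
          + (if 0 < PySem.Int.floordiv m w then 1 else 0) ≤ 2 ^ n + 2 := by
        rcases (by omega : 0 < m ∨ m < 0) with hmp | hmn
        · have hs := pvStep_negbase_pos w m hw hmp
          split_ifs with hi <;> split_ifs at h <;> omega
        · have hs := pvStep_negbase_neg w m hw hmn
          split_ifs with hi <;> split_ifs at h <;> omega
      exact ih f' w (PySem.Int.floordiv m w) hw hmeas (by omega) hq0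
    · rw [if_neg (by omega), if_neg (by omega)]

-- A's loop returns False once it reaches a digit outside {0, 1, w, w-1}; for w ≤ -2 every
-- entry is in (w, 0], so the first nonzero entry (at index j < 101) is such a digit
theorem solveLoop_false (w : Int) (l : List Int)
    (hall : ∀ k : Nat, w < l.getD k 0 ∧ l.getD k 0 ≤ 0) :
    ∀ (rem i j : Nat), i + rem = 101 → i ≤ j → j < 101 → l.getD j 0 ≠ 0 →
      solveLoop w l i rem = false := by
  intro rem
  induction rem with
  | zero => intro i j hrem hij hj hnz; omega
  | succ rem ih =>
    intro i j hrem hij hj hnz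
    obtain ⟨hlt, hle⟩ := hall i
    rw [solveLoop]
    by_cases hdi : l.getD i 0 = 0
    · have hij' : i ≠ j := by intro h; subst h; exact hnz hdi
      rw [hdi, if_pos (Or.inl rfl)]
      exact ih (i + 1) j (by omega) (by omega) hj hnz
    · rw [if_neg (by omega), if_neg (by omega)]

-- ===== VERDICT (by name: the statement is the Claim_ definition above) =====
theorem solve_spec : Claim_equal_solve := by
  unfold Claim_equal_solve
  intro w m hdom hpre
  have hdm : m.natAbs ≤ 2147483648 := by
    have : (-2147483648 ≤ m ∧ m ≤ 2147483648) ∧ (-2147483648 ≤ w ∧ w ≤ 2147483648) := by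
      unfold Dom_solve pvDomInt at hdom
      constructor <;> [skip; skip] <;>
        simp only [Bool.and_eq_true, decide_eq_true_eq] at hdom <;> tauto
    omega
  show solve w m = solve_alt w m
  have hpow : (2 : Nat) ^ 32 = 4294967296 := by norm_num
  have hlen : (convertBase 64 m w).length ≤ 64 := cb_length_le_fuel 64 m w
  have hlen101 : (convertBase 64 m w
      ++ List.replicate (101 - (convertBase 64 m w).length) 0).length = 101 := by
    simp only [List.length_append, List.length_replicate]; omega
  by_cases hm0 : m = 0
  · subst hm0
    unfold solve solve_alt
    rw [cb_zero]
    simp only [List.nil_append, List.length_nil, Nat.sub_zero]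
    rw [solveLoop_eq_procL w 101 0 _ (by simp) (by omega), List.drop_zero,
      procL_replicate_zero, alt_zero w 64 (by omega)]
  · rcases hpre with h | hpos | hneg
    · exact absurd h hm0
    · unfold solve solve_alt
      rw [solveLoop_eq_procL w 101 0 _ (by rw [hlen101]) (by omega), List.drop_zero]
      have hpad := procL_pad w (convertBase 64 m w) (101 - (convertBase 64 m w).length) 0
        (by omega) (Or.inl rfl)
      simp only [addC, if_true] at hpad
      rw [hpad]
      have heq := procC_eq_alt w hpos.1 32 64 64 m 0 (by omega) (by omega) (by omega)
        hpos.2 (Or.inl rfl)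
      rwa [add_zero] at heq
    · unfold solve solve_alt
      rw [alt_negbase_false 32 64 w m hneg (by split_ifs <;> omega) (by omega) hm0]
      obtain ⟨j, hj1, hj2⟩ := cb_exists_nonzero 32 64 m w hneg (by split_ifs <;> omega)
        (by omega) hm0
      have hgdj : (convertBase 64 m w
          ++ List.replicate (101 - (convertBase 64 m w).length) 0).getD j 0
          = (convertBase 64 m w).getD j 0 := List.getD_append _ _ 0 j hj1
      have hall : ∀ k : Nat,
          w < (convertBase 64 m w ++ List.replicate (101 - (convertBase 64 m w).length) 0).getD k 0 ∧
          (convertBase 64 m w ++ List.replicate (101 - (convertBase 64 m w).length) 0).getD k 0 ≤ 0 := by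
        intro k
        rcases pv_getD_mem_or_default
            (convertBase 64 m w ++ List.replicate (101 - (convertBase 64 m w).length) 0) k
          with hmem | hzero
        · rcases List.mem_append.mp hmem with h1 | h2
          · exact cb_mem_bounds 64 m w hneg _ h1
          · rw [List.eq_of_mem_replicate h2]; omega
        · rw [hzero]; omega
      exact solveLoop_false w _ hall 101 0 j (by omega) (by omega) (by omega)
        (by rw [hgdj]; exact hj2)
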